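-- pv_equiv track=rewrite | github.com/brannn/sql-batcher | src/sql_batcher/utils/insert_merger.py | _normalize_sql
-- ===== SOURCE A (Python) =====
-- def _normalize_sql(sql: str) -> str:
--     """Normalize SQL statement for consistent comparison.
--
--     Args:
--         sql: SQL statement to normalize.
--
--     Returns:
--         Normalized SQL statement.
--     """
--     # Preserve quoted strings while normalizing whitespace
--     normalized = []
--     in_quotes = False
--     quote_char = None
--     current_token = []
--
--     for char in sql:
--         if char in ["'", '"', '`']:
--             if not in_quotes:
--                 in_quotes = True
--                 quote_char = char
--             elif char == quote_char:
--                 in_quotes = False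
--             current_token.append(char)
--         elif in_quotes:
--             current_token.append(char)
--         elif char.isspace():
--             if current_token:
--                 normalized.append(''.join(current_token))
--                 current_token = []
--         else:
--             current_token.append(char.upper())
--
--     if current_token:
--         normalized.append(''.join(current_token))
--
--     return ' '.join(normalized)
-- ===== SOURCE B (Python) =====
-- def _collapse_upper(s: str, first: bool, last: bool) -> str:
--     """Collapse whitespace runs in an unquoted piece to single spaces and uppercase it.
--
--     A boundary space survives only when the piece does not sit at the very
--     start/end of the statement (first/last).
--     """
--     words = s.split()
--     if not words:
--         return '' if (first or last) else ' '
--     lead = ' ' if (not first and s[0].isspace()) else ''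
--     trail = ' ' if (not last and s[-1].isspace()) else ''
--     return lead + ' '.join(words).upper() + trail
--
--
-- def _normalize_sql(sql: str) -> str:
--     # Partition the statement into alternating unquoted / quoted spans and
--     # transform only the unquoted spans.
--     n = len(sql)
--     out = []
--     i = 0
--     while i < n:
--         j = i
--         while j < n and sql[j] not in "'\"`":
--             j += 1
--         if j > i:
--             out.append(_collapse_upper(sql[i:j], i == 0, j == n))
--         if j == n:
--             break
--         k = sql.find(sql[j], j + 1)
--         end = n if k == -1 else k + 1
--         out.append(sql[j:end])
--         i = end
--     return ''.join(out)
-- ===== Notes on version B (the rewrite author's own statement) =====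
-- stated objective: alternative
-- what changed: A's single-pass character state machine (in_quotes flag, token accumulator, final ' '.join) is replaced by partitioning the string into alternating unquoted/quoted spans (scan-to-quote plus str.find for the matching close), leaving quoted spans untouched and normalizing each unquoted span wholesale via split()/join()/upper() with boundary-space flags.
import Mathlib
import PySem

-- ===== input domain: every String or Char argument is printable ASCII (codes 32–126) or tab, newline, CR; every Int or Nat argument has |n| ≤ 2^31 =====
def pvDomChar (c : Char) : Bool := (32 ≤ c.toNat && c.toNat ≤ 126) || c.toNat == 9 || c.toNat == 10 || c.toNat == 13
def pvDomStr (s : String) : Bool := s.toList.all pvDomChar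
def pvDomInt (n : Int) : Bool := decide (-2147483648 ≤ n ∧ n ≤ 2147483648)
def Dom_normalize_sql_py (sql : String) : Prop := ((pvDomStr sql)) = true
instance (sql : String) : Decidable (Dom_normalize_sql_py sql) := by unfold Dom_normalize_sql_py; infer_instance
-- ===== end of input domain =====

-- B re-implements A's one-pass character state machine as a partition of the string into
-- alternating unquoted/quoted spans, transforming only the unquoted spans (objective: alternative).

-- ===== PORT A =====
-- char in ["'", '"', '`']
def isQuote (c : Char) : Bool := c == '\'' || c == '"' || c == '`'

-- ' '.join(parts), hand-ported (exact: concatenation with a single space between parts)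
def joinSp : List (List Char) → List Char
  | [] => []
  | [t] => t
  | t :: ts => t ++ ' ' :: joinSp ts

-- the for-loop of A: state (normalized, in_quotes, quote_char, current_token)
def aLoop : List Char → List (List Char) → Bool → Option Char → List Char → List (List Char)
  | [], norm, _, _, cur => if cur = [] then norm else norm ++ [cur]
  | c :: rest, norm, inq, qc, cur =>
    if isQuote c then
      if !inq then aLoop rest norm true (some c) (cur ++ [c])
      else if qc == some c then aLoop rest norm false qc (cur ++ [c])
      else aLoop rest norm inq qc (cur ++ [c])
    else if inq then aLoop rest norm inq qc (cur ++ [c])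
    else if PySem.Chars.isspace c then
      if cur = [] then aLoop rest norm inq qc cur
      else aLoop rest (norm ++ [cur]) inq qc []
    else aLoop rest norm inq qc (cur ++ [PySem.Chars.upperChar c])

def normalize_sql_py (sql : String) : String :=
  String.mk (joinSp (aLoop sql.toList [] false none []))

-- ===== PORT B =====
-- s[:1].isspace() / s[-1:].isspace(), hand-ported
def startsWS (s : List Char) : Bool := match s.head? with | some c => PySem.Chars.isspace c | none => false
def endsWS (s : List Char) : Bool := match s.getLast? with | some c => PySem.Chars.isspace c | none => false

-- s.split(), hand-ported (exact: split on whitespace runs, no empty words)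
def pySplitWs : List Char → List (List Char)
  | [] => []
  | c :: t =>
    if PySem.Chars.isspace c then pySplitWs t
    else (c :: t.takeWhile (fun x => !PySem.Chars.isspace x)) :: pySplitWs (t.dropWhile (fun x => !PySem.Chars.isspace x))
termination_by cs => cs.length
decreasing_by
  · simp
  · have := List.length_dropWhile_le (fun x => !PySem.Chars.isspace x) t
    simp only [List.length_cons]; omega

-- _collapse_upper from Source B
def collapseUpper (s : List Char) (first lastp : Bool) : List Char :=
  let words := pySplitWs s
  if words = [] then (if first || lastp then [] else [' '])
  else
    let lead := if !first && startsWS s then [' '] else []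
    let trail := if !lastp && endsWS s then [' '] else []
    lead ++ (joinSp words).map PySem.Chars.upperChar ++ trail

-- `if j > i: out.append(_collapse_upper(...))`
def bPiece (pre : List Char) (first lastp : Bool) : List Char :=
  if pre = [] then [] else collapseUpper pre first lastp

-- the while-loop of Source B: scan to the next quote, emit the transformed unquoted span,
-- then emit the (atomic) quoted span found via find(quote, j+1), and continue
def bGo (cs : List Char) (first : Bool) : List Char :=
  match h : cs.dropWhile (fun c => !isQuote c) with
  | [] => bPiece (cs.takeWhile (fun c => !isQuote c)) first true
  | q :: tail =>
    bPiece (cs.takeWhile (fun c => !isQuote c)) first false ++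
      (match tail.findIdx? (fun x => x == q) with
       | none => q :: tail
       | some k => (q :: tail.take (k + 1)) ++ bGo (tail.drop (k + 1)) false)
termination_by cs.length
decreasing_by
  have h1 : (cs.dropWhile (fun c => !isQuote c)).length ≤ cs.length :=
    List.length_dropWhile_le _ _
  rw [h] at h1
  have h2 : (tail.drop (k + 1)).length ≤ tail.length := by
    simp [List.length_drop]
  simp only [List.length_cons] at h1
  omega

def normalize_sql_py_alt (sql : String) : String :=
  String.mk (bGo sql.toList true)

-- ===== PRECONDITION & SPEC =====
def Spec_normalize_sql_py (sql : String) (out : String) : Prop := out = normalize_sql_py_alt sql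
instance (sql : String) (out : String) : Decidable (Spec_normalize_sql_py sql out) := by unfold Spec_normalize_sql_py; infer_instance

-- ===== CLAIM (what is proved, stated in full; the proofs are below) =====
def Claim_equal_normalize_sql_py : Prop := ∀ (sql : String), Dom_normalize_sql_py sql → Spec_normalize_sql_py sql (normalize_sql_py sql)

-- ===== LEMMAS AND PROOFS =====

-- accumulator-free form of A's loop
def aLoopZ : List Char → Bool → Option Char → List Char → List (List Char)
  | [], _, _, cur => if cur = [] then [] else [cur]
  | c :: rest, inq, qc, cur =>
    if isQuote c then
      if !inq then aLoopZ rest true (some c) (cur ++ [c])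
      else if qc == some c then aLoopZ rest false qc (cur ++ [c])
      else aLoopZ rest inq qc (cur ++ [c])
    else if inq then aLoopZ rest inq qc (cur ++ [c])
    else if PySem.Chars.isspace c then
      if cur = [] then aLoopZ rest inq qc cur
      else cur :: aLoopZ rest inq qc []
    else aLoopZ rest inq qc (cur ++ [PySem.Chars.upperChar c])

lemma aLoop_eq_aLoopZ : ∀ (cs : List Char) (norm : List (List Char)) (inq : Bool) (qc : Option Char) (cur : List Char),
    aLoop cs norm inq qc cur = norm ++ aLoopZ cs inq qc cur := by
  intro cs
  induction cs with
  | nil => intro norm inq qc cur; simp only [aLoop, aLoopZ]; split <;> simp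
  | cons c rest IH =>
    intro norm inq qc cur
    simp only [aLoop, aLoopZ]
    split_ifs <;> (rw [IH]; try simp)

-- A's state machine processing a quote-free span, accumulator-free
def uProc : List Char → List Char → List (List Char) × List Char
  | cur, [] => ([], cur)
  | cur, c :: t =>
    if PySem.Chars.isspace c then
      if cur = [] then uProc [] t
      else (cur :: (uProc [] t).1, (uProc [] t).2)
    else uProc (cur ++ [PySem.Chars.upperChar c]) t

-- quote_char is never read while in_quotes is false
lemma aLoopZ_qc : ∀ (cs : List Char) (cur : List Char) (qc qc' : Option Char),
    aLoopZ cs false qc cur = aLoopZ cs false qc' cur := by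
  intro cs
  induction cs with
  | nil => intro cur qc qc'; rfl
  | cons c rest IH =>
    intro cur qc qc'
    simp only [aLoopZ, Bool.not_false, if_true]
    split_ifs <;>
      first
        | rfl
        | exact IH _ _ qc'
        | exact congrArg (List.cons cur) (IH _ _ qc')

-- a quote-free span is processed exactly by uProc
lemma aLoopZ_span : ∀ (pre : List Char), (∀ c ∈ pre, isQuote c = false) →
    ∀ (rest cur : List Char) (qc : Option Char),
    aLoopZ (pre ++ rest) false qc cur = (uProc cur pre).1 ++ aLoopZ rest false qc (uProc cur pre).2 := by
  intro pre
  induction pre with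
  | nil => intro _ rest cur qc; simp [uProc]
  | cons c pre' IH =>
    intro h rest cur qc
    have hc : isQuote c = false := h c (by simp)
    have h' : ∀ x ∈ pre', isQuote x = false := fun x hx => h x (by simp [hx])
    simp only [List.cons_append, aLoopZ, hc, Bool.false_eq_true, if_false]
    by_cases hs : PySem.Chars.isspace c
    · simp only [hs, if_true]
      by_cases hcur : cur = []
      · simp only [hcur, if_true, uProc, hs]
        simpa using IH h' rest [] qc
      · simp only [hcur, if_false, uProc, hs, if_true]
        rw [IH h' rest [] qc]
        simp
    · simp only [hs, Bool.false_eq_true, if_false, uProc]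
      exact IH h' rest _ qc

-- inside quotes, with no closing quote anywhere: everything is appended to the token
lemma aLoopZ_inq_unclosed : ∀ (t : List Char) (q : Char) (cur : List Char),
    q ∉ t → cur ≠ [] → aLoopZ t true (some q) cur = [cur ++ t] := by
  intro t
  induction t with
  | nil => intro q cur _ hcur; simp [aLoopZ, hcur]
  | cons c t' IH =>
    intro q cur hmem hcur
    have hcq : c ≠ q := fun h => hmem (by simp [h])
    have hmem' : q ∉ t' := fun h => hmem (by simp [h])
    simp only [aLoopZ, Bool.not_true, Bool.false_eq_true, if_false]
    have hqc : (some q == some c) = false := by simp [hcq.symm]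
    by_cases hq : isQuote c
    · simp only [hq, if_true, hqc, Bool.false_eq_true, if_false]
      rw [IH q (cur ++ [c]) hmem' (by simp)]
      simp
    · simp only [hq, Bool.false_eq_true, if_false, if_true]
      rw [IH q (cur ++ [c]) hmem' (by simp)]
      simp

-- inside quotes, up to the first closing quote: verbatim append, then leave quotes
lemma aLoopZ_inq_closed : ∀ (t1 : List Char) (q : Char) (t2 cur : List Char),
    q ∉ t1 → isQuote q = true →
    aLoopZ (t1 ++ q :: t2) true (some q) cur = aLoopZ t2 false (some q) (cur ++ t1 ++ [q]) := by
  intro t1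
  induction t1 with
  | nil =>
    intro q t2 cur _ hq
    simp only [List.nil_append, aLoopZ, hq, if_true, Bool.not_true, Bool.false_eq_true, if_false,
      BEq.rfl, if_true]
    simp
  | cons c t1' IH =>
    intro q t2 cur hmem hq
    have hcq : c ≠ q := fun h => hmem (by simp [h])
    have hmem' : q ∉ t1' := fun h => hmem (by simp [h])
    have hqc : (some q == some c) = false := by simp [hcq.symm]
    simp only [List.cons_append, aLoopZ, Bool.not_true, Bool.false_eq_true, if_false, hqc]
    by_cases hqu : isQuote c
    · simp only [hqu, if_true]
      rw [IH q t2 (cur ++ [c]) hmem' hq]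
      simp
    · simp only [hqu, Bool.false_eq_true, if_false, if_true]
      rw [IH q t2 (cur ++ [c]) hmem' hq]
      simp

-- a nonempty pending token always yields a token
lemma aLoopZ_ne : ∀ (cs : List Char) (inq : Bool) (qc : Option Char) (cur : List Char),
    cur ≠ [] → aLoopZ cs inq qc cur ≠ [] := by
  intro cs
  induction cs with
  | nil => intro inq qc cur hcur; simp [aLoopZ, hcur]
  | cons c rest IH =>
    intro inq qc cur hcur
    simp only [aLoopZ]
    split_ifs <;> first
      | exact IH _ _ _ (by simp)
      | exact IH _ _ _ hcur
      | simp

-- join algebra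
lemma joinSp_cons_ne (t : List Char) (ts : List (List Char)) (h : ts ≠ []) :
    joinSp (t :: ts) = t ++ ' ' :: joinSp ts := by
  cases ts with
  | nil => exact absurd rfl h
  | cons a l => rfl

lemma joinSp_append (E L : List (List Char)) (hL : L ≠ []) :
    joinSp (E ++ L) = (if E = [] then [] else joinSp E ++ [' ']) ++ joinSp L := by
  induction E with
  | nil => simp
  | cons e E' IH =>
    have hEL : E' ++ L ≠ [] := by simp [hL]
    rw [List.cons_append, joinSp_cons_ne e (E' ++ L) hEL, IH]
    by_cases hE' : E' = []
    · simp [hE', joinSp]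
    · rw [joinSp_cons_ne e E' hE']
      simp [hE']

-- pySplitWs equations and facts
lemma pySplitWs_ws {c : Char} (t : List Char) (hc : PySem.Chars.isspace c = true) :
    pySplitWs (c :: t) = pySplitWs t := by
  rw [pySplitWs]; simp [hc]

lemma pySplitWs_word {c : Char} (t : List Char) (hc : PySem.Chars.isspace c = false) :
    pySplitWs (c :: t) =
      (c :: t.takeWhile (fun x => !PySem.Chars.isspace x)) ::
        pySplitWs (t.dropWhile (fun x => !PySem.Chars.isspace x)) := by
  rw [pySplitWs]; simp [hc]

lemma pySplitWs_nil : pySplitWs [] = [] := by rw [pySplitWs]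

lemma endsWS_cons {c : Char} {t : List Char} (ht : t ≠ []) : endsWS (c :: t) = endsWS t := by
  cases t with
  | nil => exact absurd rfl ht
  | cons d t' => simp [endsWS, List.getLast?_cons_cons]

lemma endsWS_all : ∀ (l : List Char), (∀ x ∈ l, PySem.Chars.isspace x = true) → l ≠ [] → endsWS l = true := by
  intro l
  induction l with
  | nil => intro _ h; exact absurd rfl h
  | cons a l' IH =>
    intro h _
    cases l' with
    | nil => simpa [endsWS] using h a (by simp)
    | cons b l'' =>
      rw [endsWS_cons (by simp)]
      exact IH (fun x hx => h x (by simp [hx])) (by simp)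

lemma pySplitWs_nil_iff : ∀ (t : List Char), pySplitWs t = [] ↔ ∀ x ∈ t, PySem.Chars.isspace x = true := by
  intro t
  induction t with
  | nil => simp [pySplitWs]
  | cons c t' IH =>
    by_cases hc : PySem.Chars.isspace c
    · rw [pySplitWs_ws t' hc]
      simp [hc, IH]
    · rw [pySplitWs_word t' (by simpa using hc)]
      simp only [List.mem_cons]
      constructor
      · intro h; exact absurd h (by simp)
      · intro h; exact absurd (h c (Or.inl rfl)) hc

lemma allWS_take_drop {t : List Char} (h : ∀ x ∈ t, PySem.Chars.isspace x = true) :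
    t.takeWhile (fun x => !PySem.Chars.isspace x) = [] ∧
      t.dropWhile (fun x => !PySem.Chars.isspace x) = t := by
  cases t with
  | nil => simp
  | cons d t' =>
    have hd : PySem.Chars.isspace d = true := h d (by simp)
    constructor
    · simp [List.takeWhile_cons, hd]
    · simp [List.dropWhile_cons, hd]

lemma uProc_ne : ∀ (t cur : List Char), cur ≠ [] → uProc cur t ≠ ([], []) := by
  intro t
  induction t with
  | nil => intro cur hcur; simp [uProc, hcur]
  | cons c t' IH =>
    intro cur hcur
    simp only [uProc]
    by_cases h1 : PySem.Chars.isspace c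
    · rw [if_pos h1, if_neg hcur]
      simp
    · rw [if_neg h1]
      exact IH _ (by simp)

lemma uProc_nil_iff : ∀ (t : List Char), uProc [] t = ([], []) ↔ pySplitWs t = [] := by
  intro t
  induction t with
  | nil => simp [uProc, pySplitWs]
  | cons c t' IH =>
    by_cases hc : PySem.Chars.isspace c
    · rw [pySplitWs_ws t' hc]
      simp only [uProc, hc, if_true]
      simpa using IH
    · rw [pySplitWs_word t' (by simpa using hc)]
      simp only [uProc, hc, Bool.false_eq_true, if_false]
      constructor
      · intro h; exact absurd h (uProc_ne t' _ (by simp))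
      · intro h; simp at h

-- the no-lead rendering of an unquoted span (what uProc produces after a token break)
def pieceNL (pre : List Char) (lastp : Bool) : List Char :=
  if pySplitWs pre = [] then []
  else (joinSp (pySplitWs pre)).map PySem.Chars.upperChar ++ (if !lastp && endsWS pre then [' '] else [])

lemma upperChar_space : PySem.Chars.upperChar ' ' = ' ' := by decide

-- C0: with first = true the piece is exactly the no-lead rendering
lemma pieceB_first (pre : List Char) (lastp : Bool) : bPiece pre true lastp = pieceNL pre lastp := by
  by_cases hpre : pre = []
  · simp [bPiece, pieceNL, hpre, pySplitWs]
  · simp only [bPiece, hpre, if_false, collapseUpper, pieceNL]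
    by_cases hw : pySplitWs pre = [] <;> simp [hw]

-- C4: a span starting with a non-space char has no lead
lemma pieceNL_word {c : Char} (t : List Char) (hc : PySem.Chars.isspace c = false) (lastp : Bool) :
    pieceNL (c :: t) lastp = bPiece (c :: t) false lastp := by
  have hw : pySplitWs (c :: t) ≠ [] := by rw [pySplitWs_word t hc]; simp
  simp only [pieceNL, bPiece, collapseUpper, hw, if_false, List.cons_ne_nil, startsWS,
    List.head?_cons, hc, Bool.and_false, if_false]
  simp [hw]

-- C1: a leading non-space char prepends its uppercase to the piece
lemma pieceB_cons_word {c : Char} (t : List Char) (hc : PySem.Chars.isspace c = false) (lastp : Bool) :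
    bPiece (c :: t) false lastp = PySem.Chars.upperChar c :: bPiece t false lastp := by
  have hw : pySplitWs (c :: t) =
      (c :: t.takeWhile (fun x => !PySem.Chars.isspace x)) ::
        pySplitWs (t.dropWhile (fun x => !PySem.Chars.isspace x)) := pySplitWs_word t hc
  have hwne : pySplitWs (c :: t) ≠ [] := by rw [hw]; simp
  simp only [bPiece, List.cons_ne_nil, if_false, collapseUpper, hwne, if_false, startsWS,
    List.head?_cons, hc, Bool.and_false, if_false]
  by_cases hsplit : pySplitWs t = []
  · -- t is all whitespace
    have hall : ∀ x ∈ t, PySem.Chars.isspace x = true := (pySplitWs_nil_iff t).mp hsplit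
    obtain ⟨htake, hdrop⟩ := allWS_take_drop hall
    rw [hw, htake, hdrop, hsplit]
    cases t with
    | nil =>
      simp [joinSp, endsWS, bPiece, pySplitWs, hc]
    | cons d t' =>
      have hd : PySem.Chars.isspace d = true := hall d (by simp)
      have hend : endsWS (c :: d :: t') = endsWS (d :: t') := endsWS_cons (by simp)
      have hendt : endsWS (d :: t') = true := endsWS_all _ hall (by simp)
      simp only [joinSp, List.map_cons, List.map_nil, hend, hendt, Bool.and_true, bPiece,
        List.cons_ne_nil, if_false, collapseUpper, hsplit, if_true]
      cases lastp <;> simp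
  · -- t still has words
    cases t with
    | nil => simp [pySplitWs] at hsplit
    | cons d t' =>
      have hend : endsWS (c :: d :: t') = endsWS (d :: t') := endsWS_cons (by simp)
      by_cases hd : PySem.Chars.isspace d
      · -- the word is just [c]; the rest begins with whitespace: its lead provides the separator
        have htake : (d :: t').takeWhile (fun x => !PySem.Chars.isspace x) = [] := by
          simp [List.takeWhile_cons, hd]
        have hdrop : (d :: t').dropWhile (fun x => !PySem.Chars.isspace x) = d :: t' := by
          simp [List.dropWhile_cons, hd]
        rw [hw, htake, hdrop]
        rw [joinSp_cons_ne _ _ hsplit]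
        simp only [List.map_append, List.map_cons, List.map_nil, upperChar_space]
        simp only [bPiece, List.cons_ne_nil, if_false, collapseUpper, hsplit, if_false, startsWS,
          List.head?_cons, hd, Bool.and_true, hend]
        simp
      · -- the word continues into t
        have htake : (d :: t').takeWhile (fun x => !PySem.Chars.isspace x) =
            d :: t'.takeWhile (fun x => !PySem.Chars.isspace x) := by
          simp [List.takeWhile_cons, hd]
        have hdrop : (d :: t').dropWhile (fun x => !PySem.Chars.isspace x) =
            t'.dropWhile (fun x => !PySem.Chars.isspace x) := by
          simp [List.dropWhile_cons, hd]
        have hwt : pySplitWs (d :: t') =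
            (d :: t'.takeWhile (fun x => !PySem.Chars.isspace x)) ::
              pySplitWs (t'.dropWhile (fun x => !PySem.Chars.isspace x)) :=
          pySplitWs_word t' (by simpa using hd)
        rw [hw, htake, hdrop]
        simp only [bPiece, List.cons_ne_nil, if_false, collapseUpper, hsplit, if_false, startsWS,
          List.head?_cons, hd, Bool.and_false, if_false, hend, hwt]
        by_cases hrest : pySplitWs (t'.dropWhile (fun x => !PySem.Chars.isspace x)) = []
        · simp [hrest, joinSp]
        · rw [joinSp_cons_ne _ _ hrest, joinSp_cons_ne _ _ hrest]
          simp

-- C2/C3: a leading space char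
lemma pieceB_cons_ws_ne {c : Char} (t : List Char) (hc : PySem.Chars.isspace c = true)
    (ht : pySplitWs t ≠ []) (lastp : Bool) :
    bPiece (c :: t) false lastp = ' ' :: pieceNL t lastp := by
  have hw : pySplitWs (c :: t) = pySplitWs t := pySplitWs_ws t hc
  have htne : t ≠ [] := by intro h; rw [h] at ht; simp [pySplitWs] at ht
  simp only [bPiece, List.cons_ne_nil, if_false, collapseUpper, hw, ht, if_false, startsWS,
    List.head?_cons, hc, Bool.and_true, endsWS_cons htne, pieceNL]
  simp [ht]

lemma pieceB_cons_ws_nil {c : Char} (t : List Char) (hc : PySem.Chars.isspace c = true)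
    (ht : pySplitWs t = []) (lastp : Bool) :
    bPiece (c :: t) false lastp = if lastp then [] else [' '] := by
  have hw : pySplitWs (c :: t) = pySplitWs t := pySplitWs_ws t hc
  simp only [bPiece, List.cons_ne_nil, if_false, collapseUpper, hw, ht, if_true]
  cases lastp <;> simp

-- C5
lemma pieceNL_cons_ws {c : Char} (t : List Char) (hc : PySem.Chars.isspace c = true) (lastp : Bool) :
    pieceNL (c :: t) lastp = pieceNL t lastp := by
  have hw : pySplitWs (c :: t) = pySplitWs t := pySplitWs_ws t hc
  cases t with
  | nil => simp [pieceNL, hw, pySplitWs_nil]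
  | cons d t' => simp [pieceNL, hw, endsWS_cons (List.cons_ne_nil d t')]

-- the two rendered forms of A's pending state after an unquoted span
def Pb (cur pre : List Char) : List Char :=
  (if (uProc cur pre).1 = [] then [] else joinSp (uProc cur pre).1 ++ [' ']) ++ (uProc cur pre).2
def Pe (cur pre : List Char) : List Char :=
  joinSp ((uProc cur pre).1 ++ (if (uProc cur pre).2 = [] then [] else [(uProc cur pre).2]))

-- the key correspondence: A's span rendering equals B's piece
lemma KB : ∀ (pre : List Char),
    (∀ cur : List Char, cur ≠ [] →
      Pb cur pre = cur ++ bPiece pre false false ∧ Pe cur pre = cur ++ bPiece pre false true) ∧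
    (Pb [] pre = pieceNL pre false ∧ Pe [] pre = pieceNL pre true) := by
  intro pre
  induction pre with
  | nil =>
    constructor
    · intro cur hcur
      constructor <;> simp [Pb, Pe, uProc, bPiece, hcur, joinSp]
    · simp [Pb, Pe, uProc, pieceNL, pySplitWs, joinSp]
  | cons c t IH =>
    have IHne := IH.1
    have IHnil1 := IH.2.1
    have IHnil2 := IH.2.2
    by_cases hc : PySem.Chars.isspace c
    · -- leading whitespace char
      by_cases hsplit : pySplitWs t = []
      · have hup : uProc [] t = ([], []) := (uProc_nil_iff t).mpr hsplit
        constructor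
        · intro cur hcur
          have hu : uProc cur (c :: t) = ([cur], []) := by
            simp [uProc, hc, hcur, hup]
          constructor
          · rw [Pb, hu, pieceB_cons_ws_nil t hc hsplit false]
            simp [joinSp]
          · rw [Pe, hu, pieceB_cons_ws_nil t hc hsplit true]
            simp [joinSp]
        · have hu : uProc ([] : List Char) (c :: t) = ([], []) := by simp [uProc, hc, hup]
          constructor
          · rw [Pb, hu, pieceNL_cons_ws t hc false]
            simp [pieceNL, hsplit]
          · rw [Pe, hu, pieceNL_cons_ws t hc true]
            simp [pieceNL, hsplit, joinSp]
      · have hne : uProc [] t ≠ ([], []) := fun h => hsplit ((uProc_nil_iff t).mp h)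
        constructor
        · intro cur hcur
          have hu : uProc cur (c :: t) = (cur :: (uProc [] t).1, (uProc [] t).2) := by
            simp [uProc, hc, hcur]
          constructor
          · rw [Pb, hu, pieceB_cons_ws_ne t hc hsplit false, ← IHnil1]
            simp only [Pb]
            by_cases hE : (uProc [] t).1 = []
            · have hc2 : (uProc [] t).2 ≠ [] := by
                intro h2; exact hne (Prod.ext hE h2)
              simp [hE, joinSp]
            · rw [joinSp_cons_ne _ _ hE]
              simp [hE]
          · rw [Pe, hu, pieceB_cons_ws_ne t hc hsplit true, ← IHnil2]
            simp only [Pe]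
            have hL : (uProc [] t).1 ++ (if (uProc [] t).2 = [] then [] else [(uProc [] t).2]) ≠ [] := by
              by_cases hE : (uProc [] t).1 = []
              · have hc2 : (uProc [] t).2 ≠ [] := fun h2 => hne (Prod.ext hE h2)
                simp [hE, hc2]
              · simp [hE]
            rw [List.cons_append, joinSp_cons_ne _ _ hL]
        · have hu : uProc ([] : List Char) (c :: t) = uProc [] t := by simp [uProc, hc]
          constructor
          · rw [Pb, hu, pieceNL_cons_ws t hc false, ← IHnil1]; rfl
          · rw [Pe, hu, pieceNL_cons_ws t hc true, ← IHnil2]; rfl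
    · -- leading word char
      have hc' : PySem.Chars.isspace c = false := by simpa using hc
      have hu : ∀ cur, uProc cur (c :: t) = uProc (cur ++ [PySem.Chars.upperChar c]) t := by
        intro cur; simp [uProc, hc]
      constructor
      · intro cur hcur
        have h1 := IHne (cur ++ [PySem.Chars.upperChar c]) (by simp)
        constructor
        · rw [Pb, hu, pieceB_cons_word t hc' false]
          have := h1.1
          rw [Pb] at this
          rw [this]
          simp
        · rw [Pe, hu, pieceB_cons_word t hc' true]
          have := h1.2
          rw [Pe] at this
          rw [this]
          simp
      · have h1 := IHne ([PySem.Chars.upperChar c]) (by simp)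
        constructor
        · rw [Pb, hu, pieceNL_word t hc' false, pieceB_cons_word t hc' false]
          have := h1.1
          rw [Pb] at this
          simpa using this
        · rw [Pe, hu, pieceNL_word t hc' true, pieceB_cons_word t hc' true]
          have := h1.2
          rw [Pe] at this
          simpa using this

-- unified form at both invariant states of the main induction
lemma KU (pre cur : List Char) (first : Bool)
    (h : cur = [] ∧ first = true ∨ cur ≠ [] ∧ first = false) :
    Pb cur pre = cur ++ bPiece pre first false ∧ Pe cur pre = cur ++ bPiece pre first true := by
  rcases h with ⟨hcur, hfirst⟩ | ⟨hcur, hfirst⟩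
  · subst hcur; subst hfirst
    refine ⟨?_, ?_⟩
    · rw [(KB pre).2.1, pieceB_first]; simp
    · rw [(KB pre).2.2, pieceB_first]; simp
  · subst hfirst
    exact (KB pre).1 cur hcur

-- list facts for the quoted-span decomposition
lemma dropWhile_head_false : ∀ (l : List Char) (p : Char → Bool) (q : Char) (tail : List Char),
    l.dropWhile p = q :: tail → p q = false := by
  intro l p
  induction l with
  | nil => intro q tail h; simp at h
  | cons c l' IH =>
    intro q tail h
    rw [List.dropWhile_cons] at h
    by_cases hp : p c
    · rw [if_pos hp] at h
      exact IH q tail h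
    · rw [if_neg hp] at h
      injection h with h1 _
      subst h1
      simpa using hp

lemma take_len_succ : ∀ (t1 : List Char) (q : Char) (t2 : List Char),
    (t1 ++ q :: t2).take (t1.length + 1) = t1 ++ [q] := by
  intro t1 q t2
  induction t1 with
  | nil => simp
  | cons a t IH => simpa using IH

lemma drop_len_succ : ∀ (t1 : List Char) (q : Char) (t2 : List Char),
    (t1 ++ q :: t2).drop (t1.length + 1) = t2 := by
  intro t1 q t2
  induction t1 with
  | nil => simp
  | cons a t IH => simpa using IH

lemma findIdx?_decomp : ∀ (l : List Char) (p : Char → Bool) (k : Nat), l.findIdx? p = some k →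
    ∃ t1 x t2, l = t1 ++ x :: t2 ∧ t1.length = k ∧ p x = true ∧ ∀ y ∈ t1, p y = false := by
  intro l
  induction l with
  | nil => intro p k h; simp at h
  | cons c l' IH =>
    intro p k h
    rw [List.findIdx?_cons] at h
    by_cases hp : p c
    · simp only [hp, if_true, Option.some.injEq] at h
      exact ⟨[], c, l', by simp, by simp [← h], hp, by simp⟩
    · simp only [hp, Bool.false_eq_true, if_false] at h
      cases hfi : l'.findIdx? p with
      | none => rw [hfi] at h; simp at h
      | some k' =>
        rw [hfi] at h
        simp only [Option.map_some, Option.some.injEq] at h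
        obtain ⟨t1, x, t2, hdec, hl, hx, hall⟩ := IH p k' hfi
        refine ⟨c :: t1, x, t2, by simp [hdec], by simp [hl, ← h], hx, ?_⟩
        intro y hy
        rcases List.mem_cons.mp hy with rfl | hy'
        · simpa using hp
        · exact hall y hy'

-- unfolding equations for bGo
lemma bGo_nil (cs : List Char) (first : Bool) (h : cs.dropWhile (fun c => !isQuote c) = []) :
    bGo cs first = bPiece (cs.takeWhile (fun c => !isQuote c)) first true := by
  rw [bGo.eq_def]
  split
  · rfl
  · next q tail heq => rw [h] at heq; simp at heq

lemma bGo_cons_none (cs : List Char) (first : Bool) (q : Char) (tail : List Char)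
    (h : cs.dropWhile (fun c => !isQuote c) = q :: tail)
    (hf : tail.findIdx? (fun x => x == q) = none) :
    bGo cs first = bPiece (cs.takeWhile (fun c => !isQuote c)) first false ++ q :: tail := by
  rw [bGo.eq_def]
  split
  · next heq => rw [h] at heq; simp at heq
  · next q' tail' heq =>
    rw [h] at heq
    injection heq with h1 h2
    subst h1; subst h2
    rw [hf]

lemma bGo_cons_some (cs : List Char) (first : Bool) (q : Char) (tail : List Char) (k : Nat)
    (h : cs.dropWhile (fun c => !isQuote c) = q :: tail)
    (hf : tail.findIdx? (fun x => x == q) = some k) :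
    bGo cs first = bPiece (cs.takeWhile (fun c => !isQuote c)) first false ++
      ((q :: tail.take (k + 1)) ++ bGo (tail.drop (k + 1)) false) := by
  rw [bGo.eq_def]
  split
  · next heq => rw [h] at heq; simp at heq
  · next q' tail' heq =>
    rw [h] at heq
    injection heq with h1 h2
    subst h1; subst h2
    rw [hf]

-- the main correspondence: A's rendered token list equals B's output
lemma main_strong : ∀ (n : Nat) (cs cur : List Char) (first : Bool), cs.length ≤ n →
    (cur = [] ∧ first = true ∨ cur ≠ [] ∧ first = false) →
    joinSp (aLoopZ cs false none cur) = cur ++ bGo cs first := by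
  intro n
  induction n with
  | zero =>
    intro cs cur first hlen hinv
    have hcs : cs = [] := by
      cases cs with
      | nil => rfl
      | cons a l => simp at hlen
    subst hcs
    have hb : bGo [] first = [] := by
      rw [bGo_nil [] first (by simp)]; simp [bPiece]
    rcases hinv with ⟨hcur, _⟩ | ⟨hcur, _⟩
    · subst hcur; simp [aLoopZ, joinSp, hb]
    · simp [aLoopZ, hcur, joinSp, hb]
  | succ n IH =>
    intro cs cur first hlen hinv
    have hcs : cs.takeWhile (fun c => !isQuote c) ++ cs.dropWhile (fun c => !isQuote c) = cs :=
      List.takeWhile_append_dropWhile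
    have hpreq : ∀ c ∈ cs.takeWhile (fun c => !isQuote c), isQuote c = false := by
      intro c hcmem
      have := List.mem_takeWhile_imp hcmem
      simpa using this
    have hA : aLoopZ cs false none cur =
        (uProc cur (cs.takeWhile (fun c => !isQuote c))).1 ++
          aLoopZ (cs.dropWhile (fun c => !isQuote c)) false none
            (uProc cur (cs.takeWhile (fun c => !isQuote c))).2 := by
      conv_lhs => rw [← hcs]
      exact aLoopZ_span _ hpreq _ cur none
    cases hR : cs.dropWhile (fun c => !isQuote c) with
    | nil =>
      rw [hA, hR]
      have hPe : joinSp ((uProc cur (cs.takeWhile (fun c => !isQuote c))).1 ++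
          (if (uProc cur (cs.takeWhile (fun c => !isQuote c))).2 = [] then []
           else [(uProc cur (cs.takeWhile (fun c => !isQuote c))).2])) =
          Pe cur (cs.takeWhile (fun c => !isQuote c)) := rfl
      have hZ : aLoopZ ([] : List Char) false none (uProc cur (cs.takeWhile (fun c => !isQuote c))).2 =
          if (uProc cur (cs.takeWhile (fun c => !isQuote c))).2 = [] then []
          else [(uProc cur (cs.takeWhile (fun c => !isQuote c))).2] := rfl
      rw [hZ, hPe, (KU _ cur first hinv).2, bGo_nil cs first hR]
    | cons q tail =>
      have hq : isQuote q = true := by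
        have := dropWhile_head_false cs (fun c => !isQuote c) q tail hR
        simpa using this
      cases hF : tail.findIdx? (fun x => x == q) with
      | none =>
        have hnotin : q ∉ tail := by
          intro hmem
          have hAll := List.findIdx?_eq_none_iff.mp hF
          have := hAll q hmem
          simp at this
        have hrest_eval : aLoopZ (q :: tail) false none
            (uProc cur (cs.takeWhile (fun c => !isQuote c))).2 =
            [(uProc cur (cs.takeWhile (fun c => !isQuote c))).2 ++ q :: tail] := by
          simp only [aLoopZ, hq, if_true, Bool.not_false, if_true]
          rw [aLoopZ_inq_unclosed tail q _ hnotin (by simp)]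
          simp
        rw [hA, hR, hrest_eval, joinSp_append _ _ (by simp)]
        have hPb := (KU (cs.takeWhile (fun c => !isQuote c)) cur first hinv).1
        rw [Pb] at hPb
        rw [bGo_cons_none cs first q tail hR hF]
        have : joinSp [(uProc cur (cs.takeWhile (fun c => !isQuote c))).2 ++ q :: tail] =
            (uProc cur (cs.takeWhile (fun c => !isQuote c))).2 ++ q :: tail := rfl
        rw [this, ← List.append_assoc, hPb, List.append_assoc]
      | some k =>
        obtain ⟨t1, x, t2, hdecomp, hlen1, hpx, hprev⟩ := findIdx?_decomp tail _ k hF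
        have hxq : x = q := by simpa using hpx
        rw [hxq] at hdecomp
        have hq_not_t1 : q ∉ t1 := by
          intro hmem
          have := hprev q hmem
          simp at this
        have hstep : aLoopZ (q :: tail) false none
            (uProc cur (cs.takeWhile (fun c => !isQuote c))).2 =
            aLoopZ t2 false none
              (((uProc cur (cs.takeWhile (fun c => !isQuote c))).2 ++ q :: t1) ++ [q]) := by
          simp only [aLoopZ, hq, if_true, Bool.not_false, if_true]
          rw [hdecomp, aLoopZ_inq_closed t1 q t2 _ hq_not_t1 hq,
            aLoopZ_qc t2 _ (some q) none]
          simp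
        have hne2 : ((uProc cur (cs.takeWhile (fun c => !isQuote c))).2 ++ q :: t1) ++ [q] ≠ [] := by
          simp
        have hlen2 : t2.length ≤ n := by
          have h1 : (cs.takeWhile (fun c => !isQuote c)).length +
              (cs.dropWhile (fun c => !isQuote c)).length = cs.length := by
            conv_rhs => rw [← hcs]
            rw [List.length_append]
          rw [hR, hdecomp] at h1
          simp only [List.length_cons, List.length_append] at h1
          omega
        have hIH := IH t2 _ false hlen2 (Or.inr ⟨hne2, rfl⟩)
        have hLne : aLoopZ t2 false none
            (((uProc cur (cs.takeWhile (fun c => !isQuote c))).2 ++ q :: t1) ++ [q]) ≠ [] :=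
          aLoopZ_ne t2 false none _ hne2
        rw [hA, hR, hstep, joinSp_append _ _ hLne, hIH]
        have htake : tail.take (k + 1) = t1 ++ [q] := by
          rw [hdecomp, ← hlen1, take_len_succ]
        have hdrop : tail.drop (k + 1) = t2 := by
          rw [hdecomp, ← hlen1, drop_len_succ]
        rw [bGo_cons_some cs first q tail k hR hF, htake, hdrop]
        have hPb := (KU (cs.takeWhile (fun c => !isQuote c)) cur first hinv).1
        rw [Pb] at hPb
        simp only [← List.append_assoc]
        rw [hPb]
        simp [List.append_assoc]

-- ===== VERDICT (by name: the statement is the Claim_ definition above) =====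
theorem normalize_sql_py_spec : Claim_equal_normalize_sql_py := by
  intro sql _
  unfold Spec_normalize_sql_py normalize_sql_py normalize_sql_py_alt
  have h := aLoop_eq_aLoopZ sql.toList [] false none []
  rw [h, List.nil_append]
  have hm := main_strong sql.toList.length sql.toList [] true le_rfl (Or.inl ⟨rfl, rfl⟩)
  rw [hm, List.nil_append]
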